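-- pv_equiv track=rewrite | github.com/seunghk1206/1-Manhattan-FullStack-Development | questions/question#26.py | solution
-- ===== SOURCE A (Python) =====
-- def solution(arrows):
--     answer = 0
--     tempL = []
--     coorL = [[0,0]]
--     for each in arrows:
--         if each == 0: coorL.append([int(coorL[-1][0]), int(coorL[-1][1])+1])
--         elif each == 1: coorL.append([int(coorL[-1][0])+1, int(coorL[-1][1])+1])
--         elif each == 2: coorL.append([int(coorL[-1][0])+1, int(coorL[-1][1])])
--         elif each == 3: coorL.append([int(coorL[-1][0])+1, int(coorL[-1][1])-1])
--         elif each == 4: coorL.append([int(coorL[-1][0]), int(coorL[-1][1])-1])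
--         elif each == 5: coorL.append([int(coorL[-1][0])-1, int(coorL[-1][1])-1])
--         elif each == 6: coorL.append([int(coorL[-1][0])-1, int(coorL[-1][1])])
--         elif each == 7: coorL.append([int(coorL[-1][0])-1, int(coorL[-1][1])+1])
--     for each in coorL:
--         if each in tempL:
--             answer += 1
--         tempL.append(each)
--     return answer
-- ===== SOURCE B (Python) =====
-- def solution(arrows):
--     DX = (0, 1, 1, 1, 0, -1, -1, -1)
--     DY = (1, 1, 0, -1, -1, -1, 0, 1)
--     x = y = 0
--     pts = [(0, 0)]
--     for a in arrows:
--         if 0 <= a <= 7: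
--             x += DX[a]
--             y += DY[a]
--             pts.append((x, y))
--     pts.sort()
--     dups = 0
--     prev = None
--     for p in pts:
--         if p == prev:
--             dups += 1
--         prev = p
--     return dups
-- ===== Notes on version B (the rewrite author's own statement) =====
-- stated objective: faster
-- what changed: B walks the arrows keeping only the current position (delta tables, skipping arrows outside 0-7), then sorts the visited positions and counts duplicates in one adjacent-equality scan over the sorted list, instead of A's coordinate list indexed at its last element followed by a quadratic incremental membership-scan counting loop.
import Mathlib
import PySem

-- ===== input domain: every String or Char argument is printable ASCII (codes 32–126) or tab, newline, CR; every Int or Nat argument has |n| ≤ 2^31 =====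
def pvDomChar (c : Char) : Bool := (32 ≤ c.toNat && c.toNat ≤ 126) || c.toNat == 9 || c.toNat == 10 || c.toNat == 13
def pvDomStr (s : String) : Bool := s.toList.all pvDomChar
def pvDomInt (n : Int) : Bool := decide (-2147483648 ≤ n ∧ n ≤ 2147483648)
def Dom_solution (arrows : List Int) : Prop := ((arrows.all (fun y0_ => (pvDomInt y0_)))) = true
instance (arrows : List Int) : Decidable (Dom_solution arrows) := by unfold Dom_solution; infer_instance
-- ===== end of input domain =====

-- B replaces A's growing coordinate list (indexed at its last element) and quadratic incremental
-- membership-scan counting loop by a current-position walk followed by sort-then-adjacent-scan duplicate counting.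
-- ===== PORT A =====
-- one step of A's first loop: append the next coordinate (computed from coorL[-1]) for arrows 0..7
def stepA (c : List (Int × Int)) (e : Int) : List (Int × Int) :=
  let last := (PySem.List.pyGet? c (-1)).getD (0, 0)  -- coorL[-1]; c is never empty when A runs this
  if e = 0 then c ++ [(last.1, last.2 + 1)]
  else if e = 1 then c ++ [(last.1 + 1, last.2 + 1)]
  else if e = 2 then c ++ [(last.1 + 1, last.2)]
  else if e = 3 then c ++ [(last.1 + 1, last.2 - 1)]
  else if e = 4 then c ++ [(last.1, last.2 - 1)]
  else if e = 5 then c ++ [(last.1 - 1, last.2 - 1)]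
  else if e = 6 then c ++ [(last.1 - 1, last.2)]
  else if e = 7 then c ++ [(last.1 - 1, last.2 + 1)]
  else c

def solution (arrows : List Int) : Int :=
  let coorL := arrows.foldl stepA [(0, 0)]
  let st := coorL.foldl
    (fun (st : Int × List (Int × Int)) each =>
      (if each ∈ st.2 then st.1 + 1 else st.1, st.2 ++ [each]))
    (0, [])
  st.1

-- ===== PORT B =====
def dxB : List Int := [0, 1, 1, 1, 0, -1, -1, -1]   -- DX
def dyB : List Int := [1, 1, 0, -1, -1, -1, 0, 1]   -- DY

-- one step of B's walk loop: state is (x, y, pts); DX[a] is in range under the 0 <= a <= 7 guard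
def stepWalk (st : Int × Int × List (Int × Int)) (a : Int) : Int × Int × List (Int × Int) :=
  if 0 ≤ a ∧ a ≤ 7 then
    let x := st.1 + (PySem.List.pyGet? dxB a).getD 0
    let y := st.2.1 + (PySem.List.pyGet? dyB a).getD 0
    (x, y, st.2.2 ++ [(x, y)])
  else st

-- one step of B's counting scan: state is (dups, prev)
def stepScan (st : Int × Option (Int × Int)) (p : Int × Int) : Int × Option (Int × Int) :=
  (if some p = st.2 then st.1 + 1 else st.1, some p)

def solution_alt (arrows : List Int) : Int :=
  let pts := (arrows.foldl stepWalk (0, 0, [(0, 0)])).2.2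
  let spts := PySem.List.sorted2 pts Prod.fst Prod.snd   -- pts.sort(): Python tuple sort = lexicographic
  (spts.foldl stepScan (0, none)).1

-- ===== PRECONDITION & SPEC =====
def Spec_solution (arrows : List Int) (out : Int) : Prop := out = solution_alt arrows
instance (arrows : List Int) (out : Int) : Decidable (Spec_solution arrows out) := by unfold Spec_solution; infer_instance

-- ===== CLAIM (what is proved, stated in full; the proofs are below) =====
def Claim_equal_solution : Prop := ∀ (arrows : List Int), Dom_solution arrows → Spec_solution arrows (solution arrows)

-- ===== LEMMAS AND PROOFS =====

-- the two building loops construct the same position list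
lemma build_eq (l : List Int) :
    ∀ (c : List (Int × Int)) (x y : Int),
      (l.foldl stepWalk (x, y, c ++ [(x, y)])).2.2 = l.foldl stepA (c ++ [(x, y)]) := by
  induction l with
  | nil => intro c x y; rfl
  | cons e l ih =>
    intro c x y
    simp only [List.foldl_cons]
    by_cases h0 : e = 0
    · subst h0
      rw [show stepWalk (x, y, c ++ [(x, y)]) 0 = (x, y + 1, (c ++ [(x, y)]) ++ [(x, y + 1)]) from by
            simp [stepWalk, dxB, dyB, PySem.List.pyGet?, PySem.List.pyIdx?],
          show stepA (c ++ [(x, y)]) 0 = (c ++ [(x, y)]) ++ [(x, y + 1)] from by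
            simp [stepA]]
      exact ih (c ++ [(x, y)]) x (y + 1)
    by_cases h1 : e = 1
    · subst h1
      rw [show stepWalk (x, y, c ++ [(x, y)]) 1 = (x + 1, y + 1, (c ++ [(x, y)]) ++ [(x + 1, y + 1)]) from by
            simp [stepWalk, dxB, dyB, PySem.List.pyGet?, PySem.List.pyIdx?],
          show stepA (c ++ [(x, y)]) 1 = (c ++ [(x, y)]) ++ [(x + 1, y + 1)] from by
            simp [stepA]]
      exact ih (c ++ [(x, y)]) (x + 1) (y + 1)
    by_cases h2 : e = 2
    · subst h2
      rw [show stepWalk (x, y, c ++ [(x, y)]) 2 = (x + 1, y, (c ++ [(x, y)]) ++ [(x + 1, y)]) from by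
            simp [stepWalk, dxB, dyB, PySem.List.pyGet?, PySem.List.pyIdx?],
          show stepA (c ++ [(x, y)]) 2 = (c ++ [(x, y)]) ++ [(x + 1, y)] from by
            simp [stepA]]
      exact ih (c ++ [(x, y)]) (x + 1) y
    by_cases h3 : e = 3
    · subst h3
      rw [show stepWalk (x, y, c ++ [(x, y)]) 3 = (x + 1, y - 1, (c ++ [(x, y)]) ++ [(x + 1, y - 1)]) from by
            simp [stepWalk, dxB, dyB, PySem.List.pyGet?, PySem.List.pyIdx?,
                  show ∀ z : Int, z + -1 = z - 1 from fun z => by omega],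
          show stepA (c ++ [(x, y)]) 3 = (c ++ [(x, y)]) ++ [(x + 1, y - 1)] from by
            simp [stepA]]
      exact ih (c ++ [(x, y)]) (x + 1) (y - 1)
    by_cases h4 : e = 4
    · subst h4
      rw [show stepWalk (x, y, c ++ [(x, y)]) 4 = (x, y - 1, (c ++ [(x, y)]) ++ [(x, y - 1)]) from by
            simp [stepWalk, dxB, dyB, PySem.List.pyGet?, PySem.List.pyIdx?,
                  show ∀ z : Int, z + -1 = z - 1 from fun z => by omega],
          show stepA (c ++ [(x, y)]) 4 = (c ++ [(x, y)]) ++ [(x, y - 1)] from by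
            simp [stepA]]
      exact ih (c ++ [(x, y)]) x (y - 1)
    by_cases h5 : e = 5
    · subst h5
      rw [show stepWalk (x, y, c ++ [(x, y)]) 5 = (x - 1, y - 1, (c ++ [(x, y)]) ++ [(x - 1, y - 1)]) from by
            simp [stepWalk, dxB, dyB, PySem.List.pyGet?, PySem.List.pyIdx?,
                  show ∀ z : Int, z + -1 = z - 1 from fun z => by omega],
          show stepA (c ++ [(x, y)]) 5 = (c ++ [(x, y)]) ++ [(x - 1, y - 1)] from by
            simp [stepA]]
      exact ih (c ++ [(x, y)]) (x - 1) (y - 1)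
    by_cases h6 : e = 6
    · subst h6
      rw [show stepWalk (x, y, c ++ [(x, y)]) 6 = (x - 1, y, (c ++ [(x, y)]) ++ [(x - 1, y)]) from by
            simp [stepWalk, dxB, dyB, PySem.List.pyGet?, PySem.List.pyIdx?,
                  show ∀ z : Int, z + -1 = z - 1 from fun z => by omega],
          show stepA (c ++ [(x, y)]) 6 = (c ++ [(x, y)]) ++ [(x - 1, y)] from by
            simp [stepA]]
      exact ih (c ++ [(x, y)]) (x - 1) y
    by_cases h7 : e = 7
    · subst h7
      rw [show stepWalk (x, y, c ++ [(x, y)]) 7 = (x - 1, y + 1, (c ++ [(x, y)]) ++ [(x - 1, y + 1)]) from by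
            simp [stepWalk, dxB, dyB, PySem.List.pyGet?, PySem.List.pyIdx?,
                  show ∀ z : Int, z + -1 = z - 1 from fun z => by omega],
          show stepA (c ++ [(x, y)]) 7 = (c ++ [(x, y)]) ++ [(x - 1, y + 1)] from by
            simp [stepA]]
      exact ih (c ++ [(x, y)]) (x - 1) (y + 1)
    · rw [show stepWalk (x, y, c ++ [(x, y)]) e = (x, y, c ++ [(x, y)]) from by
            simp only [stepWalk]; rw [if_neg (by omega)],
          show stepA (c ++ [(x, y)]) e = c ++ [(x, y)] from by
            simp [stepA, h0, h1, h2, h3, h4, h5, h6, h7]]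
      exact ih c x y

-- A's counting loop computed as total length minus number of distinct elements
lemma count_eq (l : List (Int × Int)) :
    ∀ (t s : List (Int × Int)) (a0 : Int), (∀ v, v ∈ t ↔ v ∈ s) →
      (l.foldl (fun (st : Int × List (Int × Int)) each =>
          (if each ∈ st.2 then st.1 + 1 else st.1, st.2 ++ [each])) (a0, t)).1
        + ((PySem.Set.update s l).length : Int)
      = a0 + l.length + s.length := by
  induction l with
  | nil => intro t s a0 _; simp [PySem.Set.update]
  | cons e l ih =>
    intro t s a0 h
    simp only [List.foldl_cons, PySem.Set.update_cons]
    by_cases he : e ∈ t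
    · have hs : e ∈ s := (h e).mp he
      rw [if_pos he, PySem.Set.add_of_mem hs]
      have := ih (t ++ [e]) s (a0 + 1) (by
        intro v; simp only [List.mem_append, List.mem_singleton, h v]
        constructor
        · rintro (hv | rfl); exact hv; exact hs
        · exact Or.inl)
      simp only [List.length_cons] at *
      push_cast at *
      linarith
    · have hs : e ∉ s := fun hv => he ((h e).mpr hv)
      rw [if_neg he, PySem.Set.add_of_not_mem hs]
      have := ih (t ++ [e]) (s ++ [e]) a0 (by
        intro v; simp only [List.mem_append, List.mem_singleton, h v])
      simp only [List.length_cons, List.length_append, List.length_nil] at *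
      push_cast at *
      linarith

-- number of distinct elements: |set(l)| = |l.toFinset|
lemma setLen (l : List (Int × Int)) : ((PySem.Set.ofList l).length : Int) = l.toFinset.card := by
  have h1 : (PySem.Set.ofList l).toFinset = l.toFinset := by
    apply Finset.ext; intro v
    simp [List.mem_toFinset, PySem.Set.mem_ofList]
  rw [← List.toFinset_card_of_nodup (PySem.Set.nodup_ofList l), h1]

-- the lexicographic order in which Python sorts pairs of ints
def leLex (a b : Int × Int) : Prop := a.1 < b.1 ∨ (a.1 = b.1 ∧ a.2 ≤ b.2)

-- the Bool comparison sorted2 uses, and its meaning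
def lexBefore (a b : Int × Int) : Bool :=
  decide (a.1 < b.1) || (!decide (b.1 < a.1) && decide (a.2 < b.2))

def ltLex (a b : Int × Int) : Prop := a.1 < b.1 ∨ (a.1 = b.1 ∧ a.2 < b.2)

lemma lexBefore_false_iff (a b : Int × Int) : lexBefore a b = false ↔ leLex b a := by
  simp only [lexBefore, leLex, Bool.or_eq_false_iff, decide_eq_false_iff_not, not_lt,
    Bool.and_eq_false_imp, Bool.not_eq_eq_eq_not, Bool.not_true, decide_eq_true_eq]
  omega

lemma lexBefore_true_iff (a b : Int × Int) : lexBefore a b = true ↔ ltLex a b := by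
  simp only [lexBefore, ltLex, Bool.or_eq_true, decide_eq_true_eq, Bool.and_eq_true,
    Bool.not_eq_eq_eq_not, Bool.not_true, decide_eq_false_iff_not, not_lt]
  omega

lemma pairwise_insertBy (x : Int × Int) (l : List (Int × Int))
    (h : l.Pairwise (fun a b => lexBefore b a = false)) :
    (PySem.List.insertBy lexBefore x l).Pairwise (fun a b => lexBefore b a = false) := by
  induction l with
  | nil => simp [PySem.List.insertBy]
  | cons y ys ih =>
    rcases List.pairwise_cons.mp h with ⟨hy, hys⟩
    by_cases hb : lexBefore x y = true
    · rw [show PySem.List.insertBy lexBefore x (y :: ys) = x :: y :: ys from by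
            simp [PySem.List.insertBy, hb]]
      refine List.pairwise_cons.mpr ⟨?_, h⟩
      intro z hz
      have hxy := (lexBefore_true_iff x y).mp hb
      rcases List.mem_cons.mp hz with rfl | hz'
      · rw [lexBefore_false_iff]
        simp only [ltLex, leLex] at *
        omega
      · have hyz := (lexBefore_false_iff z y).mp (hy z hz')
        rw [lexBefore_false_iff]
        simp only [ltLex, leLex] at *
        omega
    · rw [show PySem.List.insertBy lexBefore x (y :: ys) = y :: PySem.List.insertBy lexBefore x ys from by
            simp [PySem.List.insertBy, hb]]
      refine List.pairwise_cons.mpr ⟨?_, ih hys⟩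
      intro z hz
      rcases (PySem.List.mem_insertBy lexBefore x z ys).mp hz with rfl | hz'
      · simpa using hb
      · exact hy z hz'

lemma pairwise_sorted2 (l : List (Int × Int)) :
    (PySem.List.sorted2 l Prod.fst Prod.snd).Pairwise leLex := by
  have key : ∀ m : List (Int × Int), (m.foldl (fun acc x => PySem.List.insertBy lexBefore x acc) []).Pairwise
      (fun a b => lexBefore b a = false) := by
    intro m
    have : ∀ acc, acc.Pairwise (fun a b => lexBefore b a = false) →
        (m.foldl (fun acc x => PySem.List.insertBy lexBefore x acc) acc).Pairwise
          (fun a b => lexBefore b a = false) := by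
      induction m with
      | nil => intro acc h; exact h
      | cons x xs ih => intro acc h; exact ih _ (pairwise_insertBy x acc h)
    exact this [] (by simp)
  have hdef : PySem.List.sorted2 l Prod.fst Prod.snd
      = l.foldl (fun acc x => PySem.List.insertBy lexBefore x acc) [] := rfl
  rw [hdef]
  exact (key l).imp (fun h => (lexBefore_false_iff _ _).mp h)

-- B's scan over a sorted list, with a previous element below everything remaining
lemma card_cons_int (p : Int × Int) (t : List (Int × Int)) :
    ((p :: t).toFinset.card : Int) = t.toFinset.card + (if p ∈ t then 0 else 1) := by
  simp only [List.toFinset_cons]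
  by_cases hpt : p ∈ t
  · rw [Finset.insert_eq_self.mpr (List.mem_toFinset.mpr hpt), if_pos hpt]; ring
  · rw [Finset.card_insert_of_notMem (fun hc => hpt (List.mem_toFinset.mp hc)), if_neg hpt]
    push_cast; ring

lemma scan_some (m : List (Int × Int)) :
    ∀ (q : Int × Int) (d : Int), m.Pairwise leLex → (∀ z ∈ m, leLex q z) →
      (m.foldl stepScan (d, some q)).1
        = d + m.length - m.toFinset.card + (if q ∈ m then 1 else 0) := by
  induction m with
  | nil => intro q d _ _; simp
  | cons p t ih =>
    intro q d hpw hq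
    rcases List.pairwise_cons.mp hpw with ⟨hp, ht⟩
    have step : stepScan (d, some q) p = (if p = q then d + 1 else d, some p) := by
      simp [stepScan]
    rw [List.foldl_cons, step]
    have hrec := ih p (if p = q then d + 1 else d) ht hp
    have hqm : (q ∈ p :: t) ↔ p = q := by
      constructor
      · intro hmem
        rcases List.mem_cons.mp hmem with rfl | hq'
        · rfl
        · have h1 := hp q hq'
          have h2 := hq p (List.mem_cons_self ..)
          simp only [leLex] at h1 h2
          have : p.1 = q.1 ∧ p.2 = q.2 := by omega
          exact Prod.ext this.1 this.2
      · intro hpq; exact hpq ▸ List.mem_cons_self ..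
    have hd1 : ((t.toFinset.card : Nat) : Int) ≤ (t.length : Int) := by
      exact_mod_cast List.toFinset_card_le t
    rw [hrec]
    simp only [List.length_cons, hqm, card_cons_int]
    by_cases h1 : p = q
    · by_cases h2 : p ∈ t
      · rw [if_pos h1, if_pos h2, if_pos h2, if_pos h1]; push_cast; omega
      · rw [if_pos h1, if_neg h2, if_neg h2, if_pos h1]; push_cast; omega
    · by_cases h2 : p ∈ t
      · rw [if_neg h1, if_pos h2, if_pos h2, if_neg h1]; push_cast; omega
      · rw [if_neg h1, if_neg h2, if_neg h2, if_neg h1]; push_cast; omega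

lemma scan_eq (m : List (Int × Int)) (hpw : m.Pairwise leLex) :
    (m.foldl stepScan (0, none)).1 = (m.length : Int) - m.toFinset.card := by
  cases m with
  | nil => simp
  | cons p t =>
    rcases List.pairwise_cons.mp hpw with ⟨hp, ht⟩
    have step : stepScan (0, none) p = (0, some p) := by simp [stepScan]
    have hd1 : ((t.toFinset.card : Nat) : Int) ≤ (t.length : Int) := by
      exact_mod_cast List.toFinset_card_le t
    rw [List.foldl_cons, step, scan_some t p 0 ht hp]
    simp only [List.length_cons, card_cons_int]
    by_cases h2 : p ∈ t
    · rw [if_pos h2, if_pos h2]; push_cast; omega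
    · rw [if_neg h2, if_neg h2]; push_cast; omega

-- ===== VERDICT (by name: the statement is the Claim_ definition above) =====
theorem solution_spec : Claim_equal_solution := by
  unfold Claim_equal_solution
  intro arrows _
  unfold Spec_solution solution solution_alt
  dsimp only
  have hb := build_eq arrows [] 0 0
  simp only [List.nil_append] at hb
  rw [hb]
  set pts := arrows.foldl stepA [(0, 0)] with hpts
  -- A's value: |pts| - distinct(pts)
  have hA := count_eq pts [] [] 0 (fun v => Iff.rfl)
  rw [PySem.Set.update_nil_left, ] at hA
  have hA' : (pts.foldl
      (fun (st : Int × List (Int × Int)) each =>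
        (if each ∈ st.2 then st.1 + 1 else st.1, st.2 ++ [each])) (0, [])).1
      = (pts.length : Int) - pts.toFinset.card := by
    have := setLen pts
    simp only [List.length_nil] at hA
    omega
  rw [hA']
  -- B's value: same, via the sorted permutation
  have hperm := PySem.List.sorted2_perm pts Prod.fst Prod.snd false
  rw [scan_eq _ (pairwise_sorted2 pts), hperm.length_eq, (List.toFinset_eq_of_perm _ _ hperm)]
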